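-- pv_equiv track=rewrite | github.com/bitToQubits/SARC | test.py | totalPower
-- ===== SOURCE A (Python) =====
-- def totalPower(nums):
--     nums.sort()
--     mod = 10**9 + 7
--     res = 0
--     prefix = 0
--     for num in nums:
--         res = (res + num * num % mod * (prefix + num)) % mod
--         prefix = (2 * prefix + num) % mod
--     return res
-- ===== SOURCE B (Python) =====
-- def totalPower(nums):
--     # Explicit pairwise combinatorial count: nums[i] as max, nums[j] as min,
--     # 2^(i-j-1) subsequences between them. Sorts in place like A.
--     nums.sort()
--     mod = 10**9 + 7
--     res = 0
--     seen = []  # earlier elements, most recent first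
--     for num in nums:
--         sq = num * num % mod
--         res = (res + sq * num) % mod
--         p2 = 1
--         for prev in seen:
--             res = (res + sq * prev % mod * p2) % mod
--             p2 = p2 * 2 % mod
--         seen.insert(0, num)
--     return res
-- ===== Notes on version B (the rewrite author's own statement) =====
-- stated objective: alternative
-- what changed: Replaces A's incremental prefix accumulator (prefix = 2*prefix + num) with an explicit O(n^2) pairwise combinatorial count: for each element as maximum add its cube plus, for every earlier element as minimum, max^2*min*2^(gap) mod p.
import Mathlib
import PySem

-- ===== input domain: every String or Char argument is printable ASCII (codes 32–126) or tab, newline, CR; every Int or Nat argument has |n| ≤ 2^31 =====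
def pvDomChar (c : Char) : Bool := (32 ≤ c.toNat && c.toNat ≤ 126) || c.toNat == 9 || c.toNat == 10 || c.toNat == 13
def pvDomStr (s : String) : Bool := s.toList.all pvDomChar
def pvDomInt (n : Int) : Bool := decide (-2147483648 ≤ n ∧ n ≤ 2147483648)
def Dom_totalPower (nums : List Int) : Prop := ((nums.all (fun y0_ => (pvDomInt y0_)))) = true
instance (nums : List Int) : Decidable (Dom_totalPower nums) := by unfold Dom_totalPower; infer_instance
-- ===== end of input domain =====

-- ===== PORT A =====
-- A and B both sort the argument in place in Python; the equivalence proved here is about the return value.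
def totalPower (nums : List Int) : Int :=
  let s := PySem.List.sorted nums (fun x => x) false
  let m : Int := 10^9 + 7
  (s.foldl (fun (st : Int × Int) num =>
      (PySem.Int.mod (st.1 + PySem.Int.mod (num * num) m * (st.2 + num)) m,
       PySem.Int.mod (2 * st.2 + num) m)) (0, 0)).1

-- ===== PORT B =====
-- B: explicit pairwise count — for each num (as max) add num^3 and, for each earlier prev
-- (as min, kept most-recent-first in `seen`), add num^2*prev*2^gap, all mod 10^9+7.
def totalPower_alt (nums : List Int) : Int :=
  let s := PySem.List.sorted nums (fun x => x) false
  let m : Int := 10^9 + 7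
  (s.foldl (fun (st : Int × List Int) num =>
      let sq := PySem.Int.mod (num * num) m
      let r0 := PySem.Int.mod (st.1 + sq * num) m
      let inner := st.2.foldl (fun (q : Int × Int) prev =>
          (PySem.Int.mod (q.1 + PySem.Int.mod (sq * prev) m * q.2) m,
           PySem.Int.mod (q.2 * 2) m)) (r0, 1)
      (inner.1, num :: st.2)) (0, [])).1

-- ===== PRECONDITION & SPEC =====
def Spec_totalPower (nums : List Int) (out : Int) : Prop := out = totalPower_alt nums
instance (nums : List Int) (out : Int) : Decidable (Spec_totalPower nums out) := by unfold Spec_totalPower; infer_instance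

-- ===== CLAIM (what is proved, stated in full; the proofs are below) =====
def Claim_equal_totalPower : Prop := ∀ (nums : List Int), Dom_totalPower nums → Spec_totalPower nums (totalPower nums)

-- ===== LEMMAS AND PROOFS =====

-- ===== VERDICT (by name: the statement is the Claim_ definition above) =====

-- proof-side helpers: emod-phrased loop bodies and pure values
def pvP : Int := 10^9 + 7

def pvV : List Int → Int
  | [] => 0
  | a :: t => a + 2 * pvV t

def pvS : List Int → Int → Int
  | [], _ => 0
  | a :: t, p2 => a * p2 + pvS t (p2 * 2 % pvP)

def gA (st : Int × Int) (x : Int) : Int × Int :=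
  ((st.1 + x * x % pvP * (st.2 + x)) % pvP, (2 * st.2 + x) % pvP)

def gB (st : Int × List Int) (x : Int) : Int × List Int :=
  let sq := x * x % pvP
  let r0 := (st.1 + sq * x) % pvP
  let inner := st.2.foldl (fun (q : Int × Int) prev =>
      ((q.1 + sq * prev % pvP * q.2) % pvP, (q.2 * 2) % pvP)) (r0, 1)
  (inner.1, x :: st.2)

theorem idem (x : Int) : x % pvP % pvP = x % pvP := Int.emod_emod_of_dvd x dvd_rfl

theorem mod_modeq (x : Int) : x % pvP ≡ x [ZMOD pvP] := idem x

theorem portA_eq (nums : List Int) :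
    totalPower nums = ((PySem.List.sorted nums (fun x => x) false).foldl gA (0, 0)).1 := by
  simp only [totalPower,
    PySem.Int.mod_eq_emod_of_pos (show (0:Int) < 10^9+7 by norm_num)]
  rfl

theorem portB_eq (nums : List Int) :
    totalPower_alt nums = ((PySem.List.sorted nums (fun x => x) false).foldl gB (0, [])).1 := by
  simp only [totalPower_alt,
    PySem.Int.mod_eq_emod_of_pos (show (0:Int) < 10^9+7 by norm_num)]
  rfl

theorem S_modeq (seen : List Int) : ∀ (p2 q2 : Int), p2 ≡ q2 [ZMOD pvP] →
    pvS seen p2 ≡ q2 * pvV seen [ZMOD pvP] := by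
  induction seen with
  | nil => intro p2 q2 h; simp [pvS, pvV]
  | cons a t ih =>
    intro p2 q2 h
    have h2 : p2 * 2 % pvP ≡ 2 * q2 [ZMOD pvP] := by
      have := (mod_modeq (p2 * 2)).trans (h.mul_right 2)
      calc p2 * 2 % pvP ≡ q2 * 2 [ZMOD pvP] := this
        _ = 2 * q2 := by ring
    have hmain : a * p2 + pvS t (p2 * 2 % pvP) ≡ a * q2 + 2 * q2 * pvV t [ZMOD pvP] :=
      (h.mul_left a).add (ih _ _ h2)
    have e : a * q2 + 2 * q2 * pvV t = q2 * pvV (a :: t) := by simp [pvV]; ring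
    simpa [pvS, e] using hmain

theorem inner_spec (sq : Int) (seen : List Int) : ∀ (r p2 : Int), r % pvP = r →
    (seen.foldl (fun (q : Int × Int) prev =>
        ((q.1 + sq * prev % pvP * q.2) % pvP, (q.2 * 2) % pvP)) (r, p2)).1
      = (r + sq * pvS seen p2) % pvP := by
  induction seen with
  | nil => intro r p2 hr; simp [pvS, hr]
  | cons a t ih =>
    intro r p2 hr
    have step := ih ((r + sq * a % pvP * p2) % pvP) (p2 * 2 % pvP) (idem _)
    have hcong : ((r + sq * a % pvP * p2) % pvP + sq * pvS t (p2 * 2 % pvP)) % pvP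
        = (r + sq * pvS (a :: t) p2) % pvP := by
      have h1 : (r + sq * a % pvP * p2) % pvP ≡ r + sq * a * p2 [ZMOD pvP] :=
        (mod_modeq _).trans ((Int.ModEq.refl r).add ((mod_modeq (sq * a)).mul_right p2))
      have h3 := h1.add (Int.ModEq.refl (sq * pvS t (p2 * 2 % pvP)))
      have e : r + sq * a * p2 + sq * pvS t (p2 * 2 % pvP) = r + sq * pvS (a :: t) p2 := by
        simp [pvS]; ring
      exact h3.trans (by rw [e])
    simpa [List.foldl, step] using hcong

theorem key (l : List Int) : ∀ (ra pf rb : Int) (seen : List Int),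
    ra = rb → ra % pvP = ra → pf = pvV seen % pvP →
    (l.foldl gA (ra, pf)).1 = (l.foldl gB (rb, seen)).1 := by
  induction l with
  | nil => intro ra pf rb seen h _ _; simpa using h
  | cons x t ih =>
    intro ra pf rb seen hab hr hpf
    subst hab hpf
    simp only [List.foldl]
    apply ih
    · -- new res components equal
      show (ra + x * x % pvP * (pvV seen % pvP + x)) % pvP = (gB (ra, seen) x).1
      have hB : (gB (ra, seen) x).1
          = ((ra + x * x % pvP * x) % pvP + x * x % pvP * pvS seen 1) % pvP := by
        simp only [gB]
        exact inner_spec _ seen _ 1 (idem _)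
      rw [hB]
      have hL : ra + x * x % pvP * (pvV seen % pvP + x)
          ≡ ra + x * x % pvP * pvV seen + x * x % pvP * x [ZMOD pvP] := by
        have := (Int.ModEq.refl ra).add
          (((Int.ModEq.refl (x * x % pvP)).mul ((mod_modeq (pvV seen)).add_right x)))
        calc ra + x * x % pvP * (pvV seen % pvP + x)
            ≡ ra + x * x % pvP * (pvV seen + x) [ZMOD pvP] := this
          _ = ra + x * x % pvP * pvV seen + x * x % pvP * x := by ring
      have hR : (ra + x * x % pvP * x) % pvP + x * x % pvP * pvS seen 1
          ≡ ra + x * x % pvP * pvV seen + x * x % pvP * x [ZMOD pvP] := by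
        have hS : pvS seen 1 ≡ pvV seen [ZMOD pvP] := by
          simpa using S_modeq seen 1 1 (Int.ModEq.refl 1)
        have := (mod_modeq (ra + x * x % pvP * x)).add
          ((Int.ModEq.refl (x * x % pvP)).mul hS)
        calc (ra + x * x % pvP * x) % pvP + x * x % pvP * pvS seen 1
            ≡ ra + x * x % pvP * x + x * x % pvP * pvV seen [ZMOD pvP] := this
          _ = ra + x * x % pvP * pvV seen + x * x % pvP * x := by ring
      exact hL.trans hR.symm
    · exact idem _
    · -- prefix invariant
      show (2 * (pvV seen % pvP) + x) % pvP = pvV (x :: seen) % pvP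
      have : 2 * (pvV seen % pvP) + x ≡ x + 2 * pvV seen [ZMOD pvP] := by
        have := ((mod_modeq (pvV seen)).mul_left 2).add_right x
        calc 2 * (pvV seen % pvP) + x ≡ 2 * pvV seen + x [ZMOD pvP] := this
          _ = x + 2 * pvV seen := by ring
      simpa [pvV] using this

theorem totalPower_spec : Claim_equal_totalPower := by
  intro nums _
  unfold Spec_totalPower
  rw [portA_eq, portB_eq]
  exact key _ 0 0 0 [] rfl (by decide) (by simp [pvV])
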